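-- pv_equiv track=rewrite | github.com/AwkwardBoy/WechatTextModel | FreqInfer.py | direct_infer
-- ===== SOURCE A (Python) =====
-- from collections import Counter
--
-- def direct_infer(entity):
--     freq = Counter(entity)
--     result1 = freq.most_common(3)
--     result = []
--     for item in result1:
--         name, value = item
--         result.append(name)
--     result = ' '.join(result)
--     return result
-- ===== SOURCE B (Python) =====
-- def direct_infer(entity):
--     counts = {}
--     for e in entity:
--         counts[e] = counts.get(e, 0) + 1
--     items = list(counts.items())
--     names = []
--     k = 3
--     while k > 0 and items:
--         best = max(items, key=lambda kv: kv[1])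
--         names.append(best[0])
--         items.remove(best)
--         k -= 1
--     return ' '.join(names)
-- ===== Notes on version B (the rewrite author's own statement) =====
-- stated objective: alternative
-- what changed: Replaces Counter.most_common(3) (count then sort items by frequency) with an explicit dict-counting loop followed by three repeated first-maximum extractions, so no sort of the frequency table is performed.
import Mathlib
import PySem

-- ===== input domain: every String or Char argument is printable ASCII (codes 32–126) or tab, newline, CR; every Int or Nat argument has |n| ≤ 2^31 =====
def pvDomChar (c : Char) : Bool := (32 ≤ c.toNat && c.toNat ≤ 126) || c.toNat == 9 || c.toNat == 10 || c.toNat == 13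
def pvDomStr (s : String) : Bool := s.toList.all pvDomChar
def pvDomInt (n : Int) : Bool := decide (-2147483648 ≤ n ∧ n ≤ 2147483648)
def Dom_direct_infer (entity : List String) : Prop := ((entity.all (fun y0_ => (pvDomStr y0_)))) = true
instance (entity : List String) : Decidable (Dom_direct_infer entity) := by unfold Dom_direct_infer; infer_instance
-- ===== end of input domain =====

-- B replaces count-then-sort (most_common) by three repeated first-maximum extractions; objective: alternative algorithm, same result.

-- ===== PORT A =====
-- Counter(entity); most_common(3) = items sorted by count descending (stable), first 3.
def direct_infer (entity : List String) : String :=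
  let freq := PySem.Dict.counter entity
  let result1 := (PySem.List.sorted freq.items (fun p => p.2) true).take 3
  let result := result1.foldl (fun acc item => acc ++ [item.1]) []
  PySem.Str.join " " result

-- ===== PORT B =====
-- the 'while k > 0 and items' loop of Source B: max by count, append its name, remove it
def pvPickTop (k : Nat) (items : List (String × Int)) : List String :=
  match k with
  | 0 => []
  | Nat.succ k' =>
    match PySem.List.max? items (fun kv => kv.2) with
    | none => []               -- items == [] : loop exits
    | some best =>
      match PySem.List.remove? items best with
      | none => []             -- unreachable: best ∈ items
      | some rest => best.1 :: pvPickTop k' rest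

def direct_infer_alt (entity : List String) : String :=
  let counts := entity.foldl (fun d e => d.insert e (d.getD e 0 + 1)) PySem.Dict.empty
  let names := pvPickTop 3 counts.items
  PySem.Str.join " " names

-- ===== PRECONDITION & SPEC =====
def Spec_direct_infer (entity : List String) (out : String) : Prop := out = direct_infer_alt entity
instance (entity : List String) (out : String) : Decidable (Spec_direct_infer entity out) := by unfold Spec_direct_infer; infer_instance

-- ===== CLAIM (what is proved, stated in full; the proofs are below) =====
def Claim_equal_direct_infer : Prop := ∀ (entity : List String), Dom_direct_infer entity → Spec_direct_infer entity (direct_infer entity)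

-- ===== LEMMAS AND PROOFS =====

theorem pv_sorted_append_singleton {α : Type} (l : List α) (x : α) (k : α → Int) :
    PySem.List.sorted (l ++ [x]) k true
      = PySem.List.insertBy (fun a b => decide (k b < k a)) x (PySem.List.sorted l k true) := by
  simp [PySem.List.sorted, List.foldl_append]

theorem pv_max?_append_singleton {α : Type} (l : List α) (x : α) (k : α → Int) :
    PySem.List.max? (l ++ [x]) k
      = match PySem.List.max? l k with
        | none => some x
        | some m => if k m < k x then some x else some m := by
  simp only [PySem.List.max?, List.foldl_append]
  cases List.foldl (fun acc x =>
        match acc with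
        | none => some x
        | some m => if k m < k x then some x else some m) none l <;> rfl

-- stable descending sort: head is the first maximum, tail is the sort of the list with it erased
theorem pv_sorted_rev_extract {α : Type} [BEq α] [LawfulBEq α] (k : α → Int) :
    ∀ l : List α, l ≠ [] →
      ∃ m, PySem.List.max? l k = some m ∧
        PySem.List.sorted l k true = m :: PySem.List.sorted (l.erase m) k true := by
  intro l
  induction l using List.reverseRecOn with
  | nil => intro h; exact absurd rfl h
  | append_singleton l x ih =>
    intro _
    rcases eq_or_ne l [] with rfl | hl
    · exact ⟨x, by simp [PySem.List.max?], by
        simp [PySem.List.sorted, PySem.List.insertBy]⟩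
    · obtain ⟨m, hmax, hsort⟩ := ih hl
      have hmem : m ∈ l := PySem.List.max?_mem hmax
      by_cases hlt : k m < k x
      · refine ⟨x, ?_, ?_⟩
        · rw [pv_max?_append_singleton, hmax]; simp [hlt]
        · have hxl : x ∉ l := by
            intro hx
            exact absurd (PySem.List.max?_isMax hmax x hx) (not_le.mpr hlt)
          rw [pv_sorted_append_singleton, hsort]
          have : (l ++ [x]).erase x = l := by
            rw [List.erase_append_right _ (fun h => hxl h)]
            simp
          rw [this, hsort]
          simp [PySem.List.insertBy, hlt]
      · refine ⟨m, ?_, ?_⟩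
        · rw [pv_max?_append_singleton, hmax]; simp [hlt]
        · have herase : (l ++ [x]).erase m = l.erase m ++ [x] :=
            List.erase_append_left _ hmem
          rw [pv_sorted_append_singleton, hsort, herase,
              pv_sorted_append_singleton]
          simp [PySem.List.insertBy, hlt]

-- repeated first-max extraction = the first k of the stable descending sort
theorem pv_pickTop_eq_sorted_take (k : Nat) :
    ∀ l : List (String × Int),
      pvPickTop k l = ((PySem.List.sorted l (fun p => p.2) true).take k).map Prod.fst := by
  induction k with
  | zero => intro l; simp [pvPickTop]
  | succ k' ih =>
    intro l
    rcases eq_or_ne l [] with rfl | hl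
    · simp [pvPickTop, PySem.List.max?, PySem.List.sorted]
    · obtain ⟨m, hmax, hsort⟩ := pv_sorted_rev_extract (fun p : String × Int => p.2) l hl
      have hmem : m ∈ l := PySem.List.max?_mem hmax
      have hrem : PySem.List.remove? l m = some (l.erase m) :=
        PySem.List.remove?_eq_some_erase l m hmem
      simp only [pvPickTop, hmax, hrem, hsort, List.take_succ_cons, List.map_cons]
      exact congrArg _ (ih (l.erase m))

theorem pv_foldl_fst (l : List (String × Int)) :
    ∀ acc : List String, l.foldl (fun acc item => acc ++ [item.1]) acc = acc ++ l.map Prod.fst := by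
  induction l with
  | nil => intro acc; simp
  | cons x t ih => intro acc; simp [List.foldl_cons, ih]

-- ===== VERDICT (by name: the statement is the Claim_ definition above) =====
theorem direct_infer_spec : Claim_equal_direct_infer := by
  intro entity _
  unfold Spec_direct_infer direct_infer direct_infer_alt
  rw [PySem.Dict.foldl_insert_getD_add_one_eq_counter]
  simp only [pv_foldl_fst, pv_pickTop_eq_sorted_take, List.nil_append]
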